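-- pv_equiv track=rewrite | github.com/tretuttle/netsuite-skills | oracle-netsuite-help-index/scripts/build_oracle_netsuite_help_index.py | build_alphabetical_markdown
-- ===== SOURCE A (Python) =====
-- from collections import defaultdict
--
-- def build_alphabetical_markdown(items: list[tuple[str, str]], toc_url: str) -> str:
--     sections: dict[str, list[tuple[str, str]]] = defaultdict(list)
--     for title, url in sorted(items, key=lambda x: (x[0].casefold(), x[1])):
--         first = title[0].upper()
--         if not first.isalnum():
--             first = "#"
--         sections[first].append((title, url))
--
--     lines = [
--         "# Oracle NetSuite Full Help Index",
--         "",
--         f"Source: live Oracle NetSuite help TOC at {toc_url}",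
--         "",
--         f"Total links: {len(items)}",
--         "",
--         "This file is alphabetized for quick search in-editor.",
--         "",
--     ]
--     for section in sorted(sections):
--         lines.append(f"## {section}")
--         lines.append("")
--         for title, url in sections[section]:
--             lines.append(f"- [{title}]({url})")
--         lines.append("")
--     return "\n".join(lines) + "\n"
-- ===== SOURCE B (Python) =====
-- from itertools import groupby
--
--
-- def _section_key(title: str) -> str:
--     first = title[0].upper()
--     return first if first.isalnum() else "#"
--
--
-- def build_alphabetical_markdown(items: list[tuple[str, str]], toc_url: str) -> str:
--     # Sort once by (casefold(title), url), then stably by section key: the list is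
--     # then grouped consecutively with itertools.groupby -- no dict of sections.
--     ordered = sorted(items, key=lambda x: (x[0].casefold(), x[1]))
--     ordered.sort(key=lambda x: _section_key(x[0]))
--
--     lines = [
--         "# Oracle NetSuite Full Help Index",
--         "",
--         f"Source: live Oracle NetSuite help TOC at {toc_url}",
--         "",
--         f"Total links: {len(items)}",
--         "",
--         "This file is alphabetized for quick search in-editor.",
--         "",
--     ]
--     for section, group in groupby(ordered, key=lambda x: _section_key(x[0])):
--         lines.append(f"## {section}")
--         lines.append("")
--         lines.extend(f"- [{title}]({url})" for title, url in group)
--         lines.append("")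
--     return "\n".join(lines) + "\n"
-- ===== Notes on version B (the rewrite author's own statement) =====
-- stated objective: alternative
-- what changed: B drops the defaultdict-of-sections entirely: it stably sorts once more by the section key and emits the blocks with a single consecutive-grouping pass (itertools.groupby), instead of accumulating a dict of per-letter lists and iterating its sorted keys.
import Mathlib
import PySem

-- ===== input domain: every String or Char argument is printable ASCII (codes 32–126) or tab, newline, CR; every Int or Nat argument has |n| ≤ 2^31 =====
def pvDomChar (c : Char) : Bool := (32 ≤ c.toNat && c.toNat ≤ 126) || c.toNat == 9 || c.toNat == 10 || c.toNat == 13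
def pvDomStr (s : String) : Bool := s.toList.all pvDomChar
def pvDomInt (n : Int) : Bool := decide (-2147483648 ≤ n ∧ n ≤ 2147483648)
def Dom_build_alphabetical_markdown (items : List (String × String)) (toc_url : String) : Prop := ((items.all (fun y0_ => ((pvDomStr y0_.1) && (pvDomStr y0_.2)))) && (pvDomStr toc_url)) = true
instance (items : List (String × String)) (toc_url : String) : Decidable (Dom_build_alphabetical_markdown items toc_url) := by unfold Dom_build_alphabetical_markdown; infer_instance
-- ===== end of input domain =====

-- B replaces A's defaultdict grouping by one extra stable sort on the section key plus a
-- single consecutive-grouping pass (itertools.groupby); objective: alternative, no speed claim.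
-- Pre_ excludes items with an empty title, on which A raises IndexError (title[0]).

-- ===== PORT A =====
-- helper shared by both ports: the section key of a title.
-- Python: first = title[0].upper(); first if first.isalnum() else "#".
-- On the one-character string title[0], .upper()/.isalnum() are the character operations.
-- `.getD ' '` is unreachable under Pre_ (an empty title raises IndexError in Python).
def pvSectionKey (title : String) : String :=
  let first := PySem.Chars.upperChar ((PySem.Str.pyGet? title 0).getD ' ')
  if PySem.Chars.isalnum first then String.ofList [first] else "#"

-- helper shared by both ports: f"- [{title}]({url})"
def pvEntryLine (p : String × String) : String :=
  "- [" ++ p.1 ++ "](" ++ p.2 ++ ")"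

-- header lines, identical literal block in A and in B
def pvHeaderLines (items : List (String × String)) (toc_url : String) : List String :=
  [ "# Oracle NetSuite Full Help Index",
    "",
    "Source: live Oracle NetSuite help TOC at " ++ toc_url,
    "",
    "Total links: " ++ PySem.Int.toStr items.length,
    "",
    "This file is alphabetized for quick search in-editor.",
    "" ]

-- str.casefold() = str.lower() on the ASCII domain (Dom_) these theorems are about.
def build_alphabetical_markdown (items : List (String × String)) (toc_url : String) : String :=
  let srt := PySem.List.sorted2 items (fun x => PySem.Str.lower x.1) (fun x => x.2)
  let sections : PySem.Dict String (List (String × String)) :=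
    srt.foldl (fun d p => d.modify (pvSectionKey p.1) [] (fun l => l ++ [p])) PySem.Dict.empty
  let lines := pvHeaderLines items toc_url
  let lines :=
    (PySem.List.sorted sections.keys (fun x => x)).foldl
      (fun acc k =>
        ((sections.getD k []).foldl (fun a p => a ++ [pvEntryLine p])
          (acc ++ ["## " ++ k] ++ [""])) ++ [""])
      lines
  PySem.Str.join "\n" lines ++ "\n"

-- ===== PORT B =====
-- itertools.groupby over the section-key-sorted list: one block per maximal run of equal keys
def pvGroupLines : List (String × String) → List String
  | [] => []
  | x :: xs =>
    let k := pvSectionKey x.1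
    let run := x :: xs.takeWhile (fun y => pvSectionKey y.1 == k)
    let rest := xs.dropWhile (fun y => pvSectionKey y.1 == k)
    ("## " ++ k) :: "" :: (run.map pvEntryLine ++ ("" :: pvGroupLines rest))
  termination_by l => l.length
  decreasing_by
    simpa using Nat.lt_succ_of_le (List.length_dropWhile_le _ xs)

def build_alphabetical_markdown_alt (items : List (String × String)) (toc_url : String) : String :=
  let ordered := PySem.List.sorted2 items (fun x => PySem.Str.lower x.1) (fun x => x.2)
  let ordered := PySem.List.sorted ordered (fun x => pvSectionKey x.1)
  let lines := pvHeaderLines items toc_url ++ pvGroupLines ordered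
  PySem.Str.join "\n" lines ++ "\n"

-- ===== PRECONDITION & SPEC =====
-- Pre_ excludes items with an empty title: there Python A (and Python B) raise IndexError on title[0].
def Pre_build_alphabetical_markdown (items : List (String × String)) (toc_url : String) : Prop :=
  ∀ p ∈ items, p.1 ≠ ""
instance (items : List (String × String)) (toc_url : String) : Decidable (Pre_build_alphabetical_markdown items toc_url) := by unfold Pre_build_alphabetical_markdown; infer_instance

def pvWitness_build_alphabetical_markdown : (List (String × String)) × String :=
  ([("Apple", "https://a"), ("7x", "u"), ("#tag", "v")], "https://toc")

def Spec_build_alphabetical_markdown (items : List (String × String)) (toc_url : String) (out : String) : Prop := out = build_alphabetical_markdown_alt items toc_url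
instance (items : List (String × String)) (toc_url : String) (out : String) : Decidable (Spec_build_alphabetical_markdown items toc_url out) := by unfold Spec_build_alphabetical_markdown; infer_instance

-- ===== CLAIM (what is proved, stated in full; the proofs are below) =====
def Claim_equal_build_alphabetical_markdown : Prop := ∀ (items : List (String × String)) (toc_url : String), Dom_build_alphabetical_markdown items toc_url → Pre_build_alphabetical_markdown items toc_url → Spec_build_alphabetical_markdown items toc_url (build_alphabetical_markdown items toc_url)

-- ===== LEMMAS AND PROOFS =====

lemma pv_insertBy_pairwise {α κ : Type} [LinearOrder κ] (k : α → κ) (x : α) (acc : List α)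
    (h : acc.Pairwise (fun a b => k a ≤ k b)) :
    (PySem.List.insertBy (fun a b => decide (k a < k b)) x acc).Pairwise (fun a b => k a ≤ k b) := by
  induction acc with
  | nil => simp [PySem.List.insertBy]
  | cons y ys ih =>
    rcases List.pairwise_cons.mp h with ⟨hy, hys⟩
    by_cases hlt : k x < k y
    · simp only [PySem.List.insertBy, hlt, decide_true, if_true]
      refine List.pairwise_cons.mpr ⟨?_, h⟩
      intro z hz
      rcases List.mem_cons.mp hz with rfl | hz
      · exact le_of_lt hlt
      · exact le_trans (le_of_lt hlt) (hy z hz)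
    · simp only [PySem.List.insertBy, hlt, decide_false, Bool.false_eq_true, if_false]
      refine List.pairwise_cons.mpr ⟨?_, ih hys⟩
      intro z hz
      rcases (PySem.List.mem_insertBy _ _ _ _).mp hz with rfl | hz
      · exact le_of_not_gt hlt
      · exact hy z hz

lemma pv_filter_insertBy {α κ : Type} [LinearOrder κ] [BEq κ] [LawfulBEq κ] (k : α → κ) (c : κ)
    (x : α) (acc : List α) (h : acc.Pairwise (fun a b => k a ≤ k b)) :
    (PySem.List.insertBy (fun a b => decide (k a < k b)) x acc).filter (fun y => k y == c) =
      acc.filter (fun y => k y == c) ++ if k x == c then [x] else [] := by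
  induction acc with
  | nil =>
    by_cases hc : k x == c <;> simp [PySem.List.insertBy, hc]
  | cons y ys ih =>
    rcases List.pairwise_cons.mp h with ⟨hy, hys⟩
    by_cases hlt : k x < k y
    · simp only [PySem.List.insertBy, hlt, decide_true, if_true]
      by_cases hc : k x == c
      · have hc' : k x = c := by simpa using hc
        have hnil : (y :: ys).filter (fun y => k y == c) = [] := by
          apply List.filter_eq_nil_iff.mpr
          intro z hz
          have hzlt : k x < k z := by
            rcases List.mem_cons.mp hz with rfl | hz
            · exact hlt
            · exact lt_of_lt_of_le hlt (hy z hz)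
          have : k z ≠ c := by rw [← hc']; exact ne_of_gt hzlt
          simpa using this
        rw [List.filter_cons_of_pos (by simpa using hc), hnil]
        simp [hc]
      · simp [List.filter_cons, hc]
    · simp only [PySem.List.insertBy, hlt, decide_false, Bool.false_eq_true, if_false]
      rw [List.filter_cons, List.filter_cons, ih hys]
      by_cases hyc : k y == c <;> simp [hyc]

lemma pv_filter_foldl_insertBy {α κ : Type} [LinearOrder κ] [BEq κ] [LawfulBEq κ] (k : α → κ) (c : κ)
    (u : List α) (acc : List α) (h : acc.Pairwise (fun a b => k a ≤ k b)) :
    (u.foldl (fun acc x => PySem.List.insertBy (fun a b => decide (k a < k b)) x acc) acc).filter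
        (fun y => k y == c) =
      acc.filter (fun y => k y == c) ++ u.filter (fun y => k y == c) := by
  induction u generalizing acc with
  | nil => simp
  | cons x xs ih =>
    rw [List.foldl_cons, ih _ (pv_insertBy_pairwise k x acc h), pv_filter_insertBy k c x acc h,
      List.filter_cons]
    by_cases hc : k x == c <;> simp [hc]

lemma pv_filter_sorted {α κ : Type} [LinearOrder κ] [BEq κ] [LawfulBEq κ] (k : α → κ) (c : κ)
    (u : List α) :
    (PySem.List.sorted u k).filter (fun y => k y == c) = u.filter (fun y => k y == c) := by
  rw [PySem.List.sorted_eq_foldl_insertBy, pv_filter_foldl_insertBy k c u [] (by simp)]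
  simp


lemma pv_dropWhile_head {α : Type} (p : α → Bool) (l : List α) (x : α) (xs : List α)
    (h : l.dropWhile p = x :: xs) : p x = false := by
  induction l with
  | nil => simp at h
  | cons y ys ih =>
    by_cases hp : p y
    · rw [List.dropWhile_cons_of_pos hp] at h; exact ih h
    · rw [List.dropWhile_cons_of_neg hp] at h
      cases h; simpa using hp

lemma pv_discard_not_mem {α : Type} [BEq α] [LawfulBEq α] (s : PySem.Set α) (c : α)
    (h : c ∉ s) : PySem.Set.discard s c = s := by
  apply List.filter_eq_self.mpr
  intro a ha
  have : a ≠ c := fun hac => h (hac ▸ ha)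
  simpa using this

lemma pv_ofList_const_prefix {α : Type} [BEq α] [LawfulBEq α] (c : α) (l1 l2 : List α)
    (h1 : ∀ y ∈ l1, y = c) (h2 : c ∉ l2) :
    PySem.Set.ofList (c :: (l1 ++ l2)) = c :: PySem.Set.ofList l2 := by
  induction l1 with
  | nil =>
    rw [List.nil_append, PySem.Set.ofList_cons, pv_discard_not_mem _ _ (by
      intro hc; exact h2 ((PySem.Set.mem_ofList l2 c).mp hc))]
  | cons y l1 ih =>
    have hy : y = c := h1 y (by simp)
    subst hy
    have inner : PySem.Set.ofList ((y :: l1) ++ l2) = y :: PySem.Set.ofList l2 := by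
      rw [List.cons_append]
      exact ih (fun z hz => h1 z (by simp [hz]))
    rw [PySem.Set.ofList_cons, inner]
    congr 1
    have hd : PySem.Set.discard (y :: PySem.Set.ofList l2) y =
        PySem.Set.discard (PySem.Set.ofList l2) y := by
      rw [PySem.Set.discard, PySem.Set.discard, List.filter_cons]; simp
    rw [hd, pv_discard_not_mem _ _ (fun hc => h2 ((PySem.Set.mem_ofList l2 y).mp hc))]

lemma pv_step_facts {α κ : Type} [LinearOrder κ] [BEq κ] [LawfulBEq κ] (k : α → κ)
    (x : α) (xs : List α)
    (hp : ((x :: xs).map k).Pairwise (· ≤ ·)) :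
    (∀ y ∈ xs.takeWhile (fun y => k y == k x), k y = k x) ∧
    (∀ y ∈ xs.dropWhile (fun y => k y == k x), k x < k y) := by
  rw [List.map_cons] at hp
  rcases List.pairwise_cons.mp hp with ⟨hhead, htail⟩
  constructor
  · intro y hy
    simpa using List.mem_takeWhile_imp hy
  · intro y hy
    rcases hdw : xs.dropWhile (fun y => k y == k x) with _ | ⟨z, zs⟩
    · rw [hdw] at hy; simp at hy
    · rw [hdw] at hy
      have hz := pv_dropWhile_head _ _ _ _ hdw
      have hzne : k z ≠ k x := by simpa using hz
      have hzxs : z ∈ xs := by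
        have hsub := List.dropWhile_sublist (l := xs) (fun y => k y == k x)
        rw [hdw] at hsub
        exact hsub.subset (by simp)
      have hzle : k x ≤ k z := hhead _ (List.mem_map.mpr ⟨z, hzxs, rfl⟩)
      have hzlt : k x < k z := lt_of_le_of_ne hzle (Ne.symm hzne)
      rcases List.mem_cons.mp hy with rfl | hy'
      · exact hzlt
      · have hsubpair : ((z :: zs).map k).Pairwise (· ≤ ·) := by
          have hsub := List.dropWhile_sublist (l := xs) (fun y => k y == k x)
          rw [hdw] at hsub
          exact List.Pairwise.sublist (hsub.map k) htail
        rcases List.pairwise_cons.mp hsubpair with ⟨hz2, _⟩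
        exact lt_of_lt_of_le hzlt (hz2 _ (List.mem_map.mpr ⟨y, hy', rfl⟩))

set_option maxHeartbeats 1600000 in
lemma pv_group_main : ∀ (n : Nat) (u : List (String × String)), u.length ≤ n →
    (u.map (fun q => pvSectionKey q.1)).Pairwise (· ≤ ·) →
    (PySem.Set.ofList (u.map (fun q => pvSectionKey q.1))).Pairwise (· < ·) ∧
      pvGroupLines u =
        (PySem.Set.ofList (u.map (fun q => pvSectionKey q.1))).flatMap
          (fun c => ("## " ++ c) :: "" ::
            ((u.filter (fun y => pvSectionKey y.1 == c)).map pvEntryLine ++ [""])) := by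
  intro n
  induction n with
  | zero =>
    intro u hu _
    have hnil : u = [] := List.eq_nil_of_length_eq_zero (Nat.le_zero.mp hu)
    subst hnil
    simp [pvGroupLines]
  | succ n ih =>
    intro u hu hp
    cases u with
    | nil => simp [pvGroupLines]
    | cons x xs =>
      rcases pv_step_facts (fun q : String × String => pvSectionKey q.1) x xs hp with ⟨hrunK, hrestlt⟩
      rw [List.map_cons] at hp
      rcases List.pairwise_cons.mp hp with ⟨hhead, htail⟩
      have hsplit : xs.takeWhile (fun y => pvSectionKey y.1 == pvSectionKey x.1) ++
          xs.dropWhile (fun y => pvSectionKey y.1 == pvSectionKey x.1) = xs :=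
        List.takeWhile_append_dropWhile
      -- the key list of x :: xs
      have hmapd : (x :: xs).map (fun q => pvSectionKey q.1) =
          pvSectionKey x.1 ::
            ((xs.takeWhile (fun y => pvSectionKey y.1 == pvSectionKey x.1)).map
                (fun q => pvSectionKey q.1) ++
              (xs.dropWhile (fun y => pvSectionKey y.1 == pvSectionKey x.1)).map
                (fun q => pvSectionKey q.1)) := by
        rw [List.map_cons]
        congr 1
        rw [← List.map_append, hsplit]
      have hKnotrest : pvSectionKey x.1 ∉
          (xs.dropWhile (fun y => pvSectionKey y.1 == pvSectionKey x.1)).map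
            (fun q => pvSectionKey q.1) := by
        intro hmem
        rcases List.mem_map.mp hmem with ⟨y, hy, hyk⟩
        exact absurd hyk (ne_of_gt (hrestlt y hy))
      have hofL : PySem.Set.ofList ((x :: xs).map (fun q => pvSectionKey q.1)) =
          pvSectionKey x.1 ::
            PySem.Set.ofList
              ((xs.dropWhile (fun y => pvSectionKey y.1 == pvSectionKey x.1)).map
                (fun q => pvSectionKey q.1)) := by
        rw [hmapd]
        exact pv_ofList_const_prefix _ _ _
          (fun y hy => by rcases List.mem_map.mp hy with ⟨z, hz, rfl⟩; exact hrunK z hz)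
          hKnotrest
      -- filters
      have hfK : (x :: xs).filter (fun y => pvSectionKey y.1 == pvSectionKey x.1) =
          x :: xs.takeWhile (fun y => pvSectionKey y.1 == pvSectionKey x.1) := by
        rw [List.filter_cons_of_pos (by simp)]
        congr 1
        rw [← hsplit, List.filter_append,
          List.filter_eq_self.mpr (fun y hy => by simpa using hrunK y hy),
          List.filter_eq_nil_iff.mpr
            (fun y hy => by simpa using (ne_of_gt (hrestlt y hy))),
          List.append_nil]
        rw [hsplit]
      have hfne : ∀ c, c ≠ pvSectionKey x.1 →
          (x :: xs).filter (fun y => pvSectionKey y.1 == c) =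
            (xs.dropWhile (fun y => pvSectionKey y.1 == pvSectionKey x.1)).filter
              (fun y => pvSectionKey y.1 == c) := by
        intro c hc
        rw [List.filter_cons_of_neg (by simpa using fun h => hc h.symm)]
        conv_lhs => rw [← hsplit]
        rw [List.filter_append,
          List.filter_eq_nil_iff.mpr
            (fun y hy => by
              have := hrunK y hy
              simpa [this] using fun h => hc h.symm),
          List.nil_append]
      -- recursion on the rest
      have hrestlen : (xs.dropWhile (fun y => pvSectionKey y.1 == pvSectionKey x.1)).length ≤ n :=
        le_trans (List.length_dropWhile_le _ _) (Nat.le_of_succ_le_succ hu)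
      have hrestpair :
          ((xs.dropWhile (fun y => pvSectionKey y.1 == pvSectionKey x.1)).map
            (fun q => pvSectionKey q.1)).Pairwise (· ≤ ·) :=
        List.Pairwise.sublist ((List.dropWhile_sublist _).map _) htail
      rcases ih _ hrestlen hrestpair with ⟨ih1, ih2⟩
      constructor
      · rw [hofL]
        refine List.pairwise_cons.mpr ⟨?_, ih1⟩
        intro b hb
        have hb' := (PySem.Set.mem_ofList _ _).mp hb
        rcases List.mem_map.mp hb' with ⟨y, hy, rfl⟩
        exact hrestlt y hy
      · rw [pvGroupLines, hofL, List.flatMap_cons, ih2, hfK]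
        have hcong :
            ((xs.dropWhile (fun y => pvSectionKey y.1 == pvSectionKey x.1)).map
                (fun q => pvSectionKey q.1) |> PySem.Set.ofList).flatMap
              (fun c => ("## " ++ c) :: "" ::
                (((x :: xs).filter (fun y => pvSectionKey y.1 == c)).map pvEntryLine ++ [""])) =
            ((xs.dropWhile (fun y => pvSectionKey y.1 == pvSectionKey x.1)).map
                (fun q => pvSectionKey q.1) |> PySem.Set.ofList).flatMap
              (fun c => ("## " ++ c) :: "" ::
                (((xs.dropWhile (fun y => pvSectionKey y.1 == pvSectionKey x.1)).filter
                    (fun y => pvSectionKey y.1 == c)).map pvEntryLine ++ [""])) := by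
          apply List.flatMap_congr
          intro c hc
          have hc' := (PySem.Set.mem_ofList _ _).mp hc
          rcases List.mem_map.mp hc' with ⟨y, hy, rfl⟩
          rw [hfne _ (ne_of_gt (hrestlt y hy))]
        rw [← hcong]
        simp


set_option maxHeartbeats 1600000 in
theorem build_alphabetical_markdown_spec : Claim_equal_build_alphabetical_markdown := by
  unfold Claim_equal_build_alphabetical_markdown
  intro items toc _ _
  unfold Spec_build_alphabetical_markdown
  show
    PySem.Str.join "\n"
      ((PySem.List.sorted
          ((PySem.List.sorted2 items (fun x => PySem.Str.lower x.1) (fun x => x.2)).foldl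
              (fun d p => d.modify (pvSectionKey p.1) [] (fun l => l ++ [p]))
              (PySem.Dict.empty : PySem.Dict String (List (String × String)))).keys
          (fun x => x)).foldl
        (fun acc k =>
          ((((PySem.List.sorted2 items (fun x => PySem.Str.lower x.1) (fun x => x.2)).foldl
              (fun d p => d.modify (pvSectionKey p.1) [] (fun l => l ++ [p]))
              (PySem.Dict.empty : PySem.Dict String (List (String × String)))).getD k []).foldl
            (fun a p => a ++ [pvEntryLine p]) (acc ++ ["## " ++ k] ++ [""])) ++ [""])
        (pvHeaderLines items toc)) ++ "\n" =
    PySem.Str.join "\n"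
      (pvHeaderLines items toc ++
        pvGroupLines
          (PySem.List.sorted
            (PySem.List.sorted2 items (fun x => PySem.Str.lower x.1) (fun x => x.2))
            (fun x => pvSectionKey x.1))) ++ "\n"
  -- abbreviations
  generalize hS : PySem.List.sorted2 items (fun x => PySem.Str.lower x.1) (fun x => x.2) = S
  -- the grouping dict of A: keys and lookups
  have hkeys :
      (S.foldl (fun d p => d.modify (pvSectionKey p.1) [] (fun l => l ++ [p]))
          (PySem.Dict.empty : PySem.Dict String (List (String × String)))).keys =
        PySem.Set.ofList (S.map (fun p => pvSectionKey p.1)) := by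
    rw [PySem.Dict.keys_foldl_modify_key S (fun p => pvSectionKey p.1) []
      (fun _ p l => l ++ [p]) PySem.Dict.empty, PySem.Dict.keys_empty,
      PySem.Set.update_nil_left]
  have hget : ∀ c,
      (S.foldl (fun d p => d.modify (pvSectionKey p.1) [] (fun l => l ++ [p]))
          (PySem.Dict.empty : PySem.Dict String (List (String × String)))).getD c [] =
        S.filter (fun y => pvSectionKey y.1 == c) := by
    intro c
    have h := PySem.Dict.getD_foldl_modify_append
      (S.map (fun p => (pvSectionKey p.1, p)))
      (PySem.Dict.empty : PySem.Dict String (List (String × String))) c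
    rw [List.foldl_map] at h
    simpa [List.filter_map, List.map_map, Function.comp_def] using h
  -- A's rendering loop appends one block per key
  have hstep :
      (fun (acc : List String) k =>
        ((((S.foldl (fun d p => d.modify (pvSectionKey p.1) [] (fun l => l ++ [p]))
              (PySem.Dict.empty : PySem.Dict String (List (String × String)))).getD k []).foldl
          (fun a p => a ++ [pvEntryLine p]) (acc ++ ["## " ++ k] ++ [""])) ++ [""])) =
      fun (acc : List String) k =>
        acc ++ (("## " ++ k) :: "" ::
          ((S.filter (fun y => pvSectionKey y.1 == k)).map pvEntryLine ++ [""])) := by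
    funext acc k
    rw [hget k, PySem.List.foldl_append_singleton_eq_map]
    simp [List.append_assoc]
  rw [hkeys, hstep, PySem.List.foldl_append_eq_flatMap]
  -- B's grouping pass
  have hTpair := PySem.List.sorted_map_key_pairwise S (fun p => pvSectionKey p.1)
  obtain ⟨hlt, hgroup⟩ := pv_group_main
    (PySem.List.sorted S (fun p => pvSectionKey p.1)).length
    (PySem.List.sorted S (fun p => pvSectionKey p.1)) le_rfl hTpair
  -- sorted distinct keys of A = consecutive distinct keys of B's sorted list
  have hsortedkeys :
      PySem.List.sorted (PySem.Set.ofList (S.map (fun p => pvSectionKey p.1))) (fun x => x) =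
        PySem.Set.ofList
          ((PySem.List.sorted S (fun p => pvSectionKey p.1)).map (fun p => pvSectionKey p.1)) := by
    apply PySem.List.sorted_eq_of_perm_of_pairwise_lt
    · refine (List.perm_ext_iff_of_nodup (PySem.Set.nodup_ofList _) (PySem.Set.nodup_ofList _)).mpr ?_
      intro a
      simp only [PySem.Set.mem_ofList, List.mem_map, PySem.List.mem_sorted]
    · exact hlt
  rw [hsortedkeys, hgroup]
  -- the per-key groups agree: filtering the section-sorted list = filtering the input order
  congr 1
  congr 1
  congr 1
  apply List.flatMap_congr
  intro c _
  rw [pv_filter_sorted (fun p => pvSectionKey p.1) c S]
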